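-- pv_equiv track=rewrite | github.com/TreeBomb-01/algo-study | programmers/Lv1/신고 결과 받기/GPT-code.py | solution
-- ===== SOURCE A (Python) =====
-- def solution(id_list, report, k):
--     # 1) 중복 신고 제거
--     unique = set(report)
--
--     # 2) 자료구조 준비
--     reported_by = {u: set() for u in id_list}  # 신고자 -> (신고 대상들)
--     reported_cnt = {u: 0 for u in id_list}     # 피신고자 -> 신고당한 횟수
--
--     # 3) 집계
--     for rec in unique:
--         a, b = rec.split()
--         if b in reported_by[a]:
--             continue
--         reported_by[a].add(b)
--         if b in reported_cnt:     # 안전 guard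
--             reported_cnt[b] += 1
--
--     # 4) 정지 유저
--     suspended = {u for u, c in reported_cnt.items() if c >= k}
--
--     # 5) 메일 카운트 (id_list 순서)
--     answer = []
--     for u in id_list:
--         cnt = sum(1 for target in reported_by[u] if target in suspended)
--         answer.append(cnt)
--     return answer
-- ===== SOURCE B (Python) =====
-- def solution(id_list, report, k):
--     ids = set(id_list)
--     reporters_of = {u: set() for u in id_list}
--     for r in set(report):
--         a, b = r.split()
--         if b in ids:
--             reporters_of[b].add(a)
--     mail = {u: 0 for u in id_list}
--     for reps in reporters_of.values():
--         if len(reps) >= k: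
--             for a in reps:
--                 mail[a] += 1
--     return [mail[u] for u in id_list]
-- ===== Notes on version B (the rewrite author's own statement) =====
-- stated objective: alternative
-- what changed: B inverts the data structure: instead of A's reporter->targets map plus a separate per-target counter maintained with a duplicate-pair guard, B builds one target->reporters reverse map (set-add makes the duplicate guard unnecessary), derives suspension from the reporter-set's size and accumulates each user's mail count by crediting every reporter of each suspended target.
import Mathlib
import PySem

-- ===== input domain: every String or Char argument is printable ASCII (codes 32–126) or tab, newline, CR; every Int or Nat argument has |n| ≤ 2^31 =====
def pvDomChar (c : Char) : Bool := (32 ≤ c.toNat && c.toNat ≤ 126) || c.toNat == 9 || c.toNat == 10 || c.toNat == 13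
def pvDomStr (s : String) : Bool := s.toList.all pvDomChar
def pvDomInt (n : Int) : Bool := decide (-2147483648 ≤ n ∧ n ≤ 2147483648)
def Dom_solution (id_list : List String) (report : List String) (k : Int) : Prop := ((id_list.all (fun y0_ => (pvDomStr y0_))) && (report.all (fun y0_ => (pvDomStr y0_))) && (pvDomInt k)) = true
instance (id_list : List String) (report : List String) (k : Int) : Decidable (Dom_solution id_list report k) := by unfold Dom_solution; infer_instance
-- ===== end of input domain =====

-- B replaces A's reporter→targets map plus separate count dict by a single target→reporters reverse map
-- (suspension = set size, mails accumulated per suspended target): an alternative decomposition, same cost.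

-- ===== PORT A =====
-- shared helper: {u: v for u in xs}
def pvInitDict {ν : Type} (xs : List String) (v : ν) : PySem.Dict String ν :=
  xs.foldl (fun d u => d.insert u v) PySem.Dict.empty

-- the body of A's aggregation loop (step 3)
def pvStepA (st : PySem.Dict String (PySem.Set String) × PySem.Dict String Int)
    (rec : String) : PySem.Dict String (PySem.Set String) × PySem.Dict String Int :=
  match PySem.Str.split₀ rec with
  | [a, b] =>
    match st.1.get? a with
    | some s =>
      if PySem.Set.contains s b then st
      else (st.1.insert a (PySem.Set.add s b),
            if st.2.contains b then st.2.modify b 0 (· + 1) else st.2)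
    | none => st      -- Python raises KeyError here (excluded by Pre_solution)
  | _ => st           -- Python raises ValueError here (excluded by Pre_solution)

def solution (id_list : List String) (report : List String) (k : Int) : List Int :=
  let unique : PySem.Set String := PySem.Set.ofList report
  let st := unique.foldl pvStepA
      (pvInitDict id_list PySem.Set.empty, pvInitDict id_list (0 : Int))
  let suspended : PySem.Set String :=
    PySem.Set.ofList ((st.2.items.filter (fun p => k ≤ p.2)).map (fun p => p.1))
  id_list.map (fun u =>
    (((st.1.getD u PySem.Set.empty).countP (fun t => PySem.Set.contains suspended t) : Nat) : Int))

-- ===== PORT B =====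
-- the body of B's reverse-map loop
def pvStepB (ids : PySem.Set String) (d : PySem.Dict String (PySem.Set String))
    (r : String) : PySem.Dict String (PySem.Set String) :=
  match PySem.Str.split₀ r with
  | [a, b] =>
    if PySem.Set.contains ids b then d.modify b PySem.Set.empty (fun s => PySem.Set.add s a)
    else d
  | _ => d            -- Python raises ValueError here (excluded by Pre_solution)

-- the body of B's mail-accumulation loop
def pvMailStep (k : Int) (m : PySem.Dict String Int) (reps : PySem.Set String) :
    PySem.Dict String Int :=
  if k ≤ (PySem.Set.len reps : Int) then
    reps.foldl (fun m a => m.modify a 0 (· + 1)) m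
  else m

def solution_alt (id_list : List String) (report : List String) (k : Int) : List Int :=
  let ids : PySem.Set String := PySem.Set.ofList id_list
  let rof := (PySem.Set.ofList report).foldl (pvStepB ids) (pvInitDict id_list PySem.Set.empty)
  let mail := rof.values.foldl (pvMailStep k) (pvInitDict id_list (0 : Int))
  id_list.map (fun u => mail.getD u 0)

-- ===== PRECONDITION & SPEC =====
-- the (reporter, target) pair of a record, when it splits into exactly two words
def pvPairOf (r : String) : Option (String × String) :=
  match PySem.Str.split₀ r with
  | [a, b] => some (a, b)
  | _ => none

-- a record is well-formed when it splits into exactly two words and the reporter is a known id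
def pvRecOk (id_list : List String) (r : String) : Bool :=
  match pvPairOf r with
  | some (a, _b) => id_list.contains a
  | none => false

-- Pre_ excludes exactly the inputs on which A raises: a report record that does not split into
-- two words (ValueError on unpacking) or whose reporter is not in id_list (KeyError).
def Pre_solution (id_list : List String) (report : List String) (k : Int) : Prop :=
  ∀ r ∈ report, pvRecOk id_list r = true
instance (id_list : List String) (report : List String) (k : Int) : Decidable (Pre_solution id_list report k) := by unfold Pre_solution; infer_instance

def pvWitness_solution : List String × List String × Int :=
  (["muzi", "frodo", "apeach"], (["muzi frodo", "apeach frodo", "frodo muzi"], 2))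

def Spec_solution (id_list : List String) (report : List String) (k : Int) (out : List Int) : Prop := out = solution_alt id_list report k
instance (id_list : List String) (report : List String) (k : Int) (out : List Int) : Decidable (Spec_solution id_list report k out) := by unfold Spec_solution; infer_instance

-- ===== CLAIM (what is proved, stated in full; the proofs are below) =====
def Claim_equal_solution : Prop := ∀ (id_list : List String) (report : List String) (k : Int), Dom_solution id_list report k → Pre_solution id_list report k → Spec_solution id_list report k (solution id_list report k)

-- ===== LEMMAS AND PROOFS =====
def pvPairs (l : List String) : List (String × String) := l.filterMap pvPairOf

def pvSeconds (u : String) (l : List String) : List String :=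
  ((pvPairs l).filter (fun p => p.1 == u)).map (fun p => p.2)

def pvFirsts (b : String) (l : List String) : List String :=
  ((pvPairs l).filter (fun p => p.2 == b)).map (fun p => p.1)

def pvCnt (l : List String) (b : String) : Nat :=
  (PySem.Set.ofList (pvPairs l)).countP (fun p => p.2 == b)

theorem pv_init_get?_aux {ν : Type} (xs : List String) (v : ν) (d : PySem.Dict String ν) (u : String) :
    (xs.foldl (fun d x => d.insert x v) d).get? u = if u ∈ xs then some v else d.get? u := by
  induction xs generalizing d with
  | nil => simp
  | cons x xs ih =>
    simp only [List.foldl_cons, ih, PySem.Dict.get?_insert, List.mem_cons]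
    by_cases h1 : u ∈ xs <;> by_cases h2 : u = x <;> simp [h1, h2]

theorem pv_init_get? {ν : Type} (xs : List String) (v : ν) (u : String) :
    (pvInitDict xs v).get? u = if u ∈ xs then some v else none := by
  simpa [pvInitDict] using pv_init_get?_aux xs v PySem.Dict.empty u

theorem pv_init_keys {ν : Type} (xs : List String) (v : ν) :
    (pvInitDict xs v).keys = PySem.Set.ofList xs := by
  have h := PySem.Dict.keys_foldl_insert (ν := ν) xs (fun _ _ => v) PySem.Dict.empty
  simpa [pvInitDict, PySem.Dict.keys_empty, PySem.Set.update_nil_left] using h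

theorem pv_mem_seconds (u b : String) (l : List String) :
    b ∈ pvSeconds u l ↔ (u, b) ∈ pvPairs l := by
  simp only [pvSeconds, List.mem_map, List.mem_filter, beq_iff_eq]
  constructor
  · rintro ⟨p, ⟨hp, h1⟩, h2⟩
    cases p; simp_all
  · intro h
    exact ⟨(u, b), ⟨h, rfl⟩, rfl⟩

theorem pv_mem_firsts (a b : String) (l : List String) :
    a ∈ pvFirsts b l ↔ (a, b) ∈ pvPairs l := by
  simp only [pvFirsts, List.mem_map, List.mem_filter, beq_iff_eq]
  constructor
  · rintro ⟨p, ⟨hp, h1⟩, h2⟩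
    cases p; simp_all
  · intro h
    exact ⟨(a, b), ⟨h, rfl⟩, rfl⟩

-- contains, as a decidable membership test
theorem pv_contains_eq (s : PySem.Set String) (x : String) :
    PySem.Set.contains s x = decide (x ∈ s) := by
  by_cases h : x ∈ s
  · simp only [h, decide_true]
    exact (PySem.Set.contains_iff s x).mpr h
  · cases hc : PySem.Set.contains s x with
    | true => exact absurd ((PySem.Set.contains_iff s x).mp hc) h
    | false => simp [h]

theorem pv_mem_firstsL (q : List (String × String)) (a b : String) :
    a ∈ (q.filter (fun p => p.2 == b)).map (fun p => p.1) ↔ (a, b) ∈ q := by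
  simp only [List.mem_map, List.mem_filter, beq_iff_eq]
  constructor
  · rintro ⟨p, ⟨hp, h1⟩, h2⟩
    cases p; simp_all
  · intro h
    exact ⟨(a, b), ⟨h, rfl⟩, rfl⟩

-- A's loop invariant
theorem pv_A_inv (id_list : List String) (l : List String)
    (hpre : ∀ r ∈ l, pvRecOk id_list r = true) :
    (∀ u, (l.foldl pvStepA (pvInitDict id_list PySem.Set.empty, pvInitDict id_list (0 : Int))).1.get? u
        = if u ∈ id_list then some (PySem.Set.ofList (pvSeconds u l)) else none) ∧
    (∀ b, (l.foldl pvStepA (pvInitDict id_list PySem.Set.empty, pvInitDict id_list (0 : Int))).2.getD b 0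
        = if b ∈ id_list then (pvCnt l b : Int) else 0) ∧
    (l.foldl pvStepA (pvInitDict id_list PySem.Set.empty, pvInitDict id_list (0 : Int))).2.keys
        = PySem.Set.ofList id_list := by
  induction l using List.reverseRecOn with
  | nil =>
    simp only [List.foldl_nil]
    refine ⟨fun u => ?_, fun b => ?_, pv_init_keys id_list (0 : Int)⟩
    · rw [pv_init_get?]
      by_cases hu : u ∈ id_list <;> simp [hu, pvSeconds, pvPairs]
    · rw [PySem.Dict.getD_eq_get?_getD, pv_init_get?]
      by_cases hb : b ∈ id_list <;> simp [hb, pvCnt, pvPairs]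
  | append_singleton l r ih =>
    have hpre' : ∀ x ∈ l, pvRecOk id_list x = true :=
      fun x h => hpre x (List.mem_append_left _ h)
    obtain ⟨ih1, ih2, ih3⟩ := ih hpre'
    have hr := hpre r (List.mem_append_right _ (List.mem_singleton_self r))
    unfold pvRecOk at hr
    cases hp : pvPairOf r with
    | none => rw [hp] at hr; exact absurd hr (by simp)
    | some ab =>
    obtain ⟨a, b⟩ := ab
    rw [hp] at hr
    have ha : a ∈ id_list := by simpa using hr
    have hsplit : PySem.Str.split₀ r = [a, b] := by
      unfold pvPairOf at hp
      split at hp <;> simp_all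
    have hpairs : pvPairs (l ++ [r]) = pvPairs l ++ [(a, b)] := by
      simp [pvPairs, List.filterMap_append, hp]
    have hsec : ∀ u, pvSeconds u (l ++ [r])
        = if a = u then pvSeconds u l ++ [b] else pvSeconds u l := by
      intro u
      simp only [pvSeconds, hpairs, List.filter_append, List.map_append]
      by_cases hu : a = u
      · subst hu; simp
      · simp [hu]
    rw [List.foldl_append, List.foldl_cons, List.foldl_nil]
    set st := l.foldl pvStepA (pvInitDict id_list PySem.Set.empty, pvInitDict id_list (0 : Int)) with hst
    have hget : st.1.get? a = some (PySem.Set.ofList (pvSeconds a l)) := by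
      rw [ih1 a, if_pos ha]
    have hcont : PySem.Set.contains (PySem.Set.ofList (pvSeconds a l)) b
        = decide ((a, b) ∈ pvPairs l) := by
      rw [pv_contains_eq]
      simp [PySem.Set.mem_ofList, pv_mem_seconds]
    by_cases hab : (a, b) ∈ pvPairs l
    · -- duplicate pair: the state does not change
      have hmem : b ∈ pvSeconds a l := (pv_mem_seconds a b l).mpr hab
      have hstep : pvStepA st r = st := by
        simp [pvStepA, hsplit, hget, hmem]
      rw [hstep]
      have hofl : ∀ u, PySem.Set.ofList (pvSeconds u (l ++ [r])) = PySem.Set.ofList (pvSeconds u l) := by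
        intro u
        rw [hsec u]
        by_cases hu : a = u
        · rw [if_pos hu, PySem.Set.ofList_append_singleton,
              PySem.Set.add_of_mem ((PySem.Set.mem_ofList _ _).mpr ((pv_mem_seconds u b l).mpr (hu ▸ hab)))]
        · rw [if_neg hu]
      have hcnt : ∀ b', pvCnt (l ++ [r]) b' = pvCnt l b' := by
        intro b'
        unfold pvCnt
        rw [hpairs, PySem.Set.ofList_append_singleton,
            PySem.Set.add_of_mem ((PySem.Set.mem_ofList _ _).mpr hab)]
      exact ⟨fun u => by rw [ih1 u, hofl u], fun b' => by rw [ih2 b', hcnt b'], ih3⟩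
    · -- fresh pair
      have hstep : pvStepA st r
          = (st.1.insert a ((PySem.Set.ofList (pvSeconds a l)).add b),
             if st.2.contains b then st.2.modify b 0 (· + 1) else st.2) := by
        have hnmem : ¬ b ∈ pvSeconds a l := fun h => hab ((pv_mem_seconds a b l).mp h)
        simp [pvStepA, hsplit, hget, hnmem]
      rw [hstep]
      have hpnew : PySem.Set.ofList (pvPairs (l ++ [r])) = PySem.Set.ofList (pvPairs l) ++ [(a, b)] := by
        rw [hpairs, PySem.Set.ofList_append_singleton,
            PySem.Set.add_of_not_mem (fun h => hab ((PySem.Set.mem_ofList _ _).mp h))]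
      have hcnt' : ∀ b', (pvCnt (l ++ [r]) b' : Int)
          = (pvCnt l b' : Int) + (if b' = b then 1 else 0) := by
        intro b'
        unfold pvCnt
        rw [hpnew, List.countP_append]
        by_cases hbb : b' = b
        · subst hbb; simp
        · have h0 : List.countP (fun p => p.2 == b') [(a, b)] = 0 := by
            simp only [List.countP_cons, List.countP_nil]
            simp [beq_iff_eq, Ne.symm hbb]
          rw [h0, if_neg hbb]
          push_cast
          ring
      have hctn : st.2.contains b = decide (b ∈ id_list) := by
        rw [PySem.Dict.contains_eq_decide_mem_keys, ih3]
        simp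
      refine ⟨fun u => ?_, fun b' => ?_, ?_⟩
      · rw [PySem.Dict.get?_insert]
        by_cases hu : u = a
        · subst hu
          rw [if_pos rfl, hsec u, if_pos rfl, if_pos ha, PySem.Set.ofList_append_singleton]
        · rw [if_neg hu, ih1 u, hsec u, if_neg (fun h : a = u => hu h.symm)]
      · rw [hcnt' b', hctn]
        by_cases hbid : b ∈ id_list
        · simp only [hbid, decide_true, if_true]
          by_cases hbb : b' = b
          · subst hbb
            rw [PySem.Dict.getD_modify, if_pos rfl, ih2 b']
            simp [hbid]
          · rw [PySem.Dict.getD_modify, if_neg hbb, ih2 b']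
            simp [hbb]
        · simp only [hbid, decide_false, Bool.false_eq_true, if_false]
          rw [ih2 b']
          by_cases hbb : b' = b
          · subst hbb
            simp [hbid]
          · simp [hbb]
      · rw [hctn]
        by_cases hbid : b ∈ id_list
        · simp only [hbid, decide_true, if_true]
          have hcb : st.2.contains b = true := by rw [hctn]; simp [hbid]
          rw [PySem.Dict.keys_modify, PySem.Dict.keys_insert_of_contains _ _ hcb, ih3]
        · simp only [hbid, decide_false, Bool.false_eq_true, if_false]
          exact ih3

-- B's reverse-map loop invariant
theorem pv_B_inv (id_list : List String) (l : List String)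
    (hpre : ∀ r ∈ l, pvRecOk id_list r = true) :
    (∀ b, (l.foldl (pvStepB (PySem.Set.ofList id_list)) (pvInitDict id_list PySem.Set.empty)).getD b PySem.Set.empty
        = if b ∈ id_list then PySem.Set.ofList (pvFirsts b l) else PySem.Set.empty) ∧
    (l.foldl (pvStepB (PySem.Set.ofList id_list)) (pvInitDict id_list PySem.Set.empty)).keys
        = PySem.Set.ofList id_list := by
  induction l using List.reverseRecOn with
  | nil =>
    simp only [List.foldl_nil]
    refine ⟨fun b => ?_, pv_init_keys id_list PySem.Set.empty⟩
    rw [PySem.Dict.getD_eq_get?_getD, pv_init_get?]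
    by_cases hb : b ∈ id_list <;> simp [hb, pvFirsts, pvPairs]
  | append_singleton l r ih =>
    have hpre' : ∀ x ∈ l, pvRecOk id_list x = true :=
      fun x h => hpre x (List.mem_append_left _ h)
    obtain ⟨ih1, ih2⟩ := ih hpre'
    have hr := hpre r (List.mem_append_right _ (List.mem_singleton_self r))
    unfold pvRecOk at hr
    cases hp : pvPairOf r with
    | none => rw [hp] at hr; exact absurd hr (by simp)
    | some ab =>
    obtain ⟨a, b⟩ := ab
    rw [hp] at hr
    have hsplit : PySem.Str.split₀ r = [a, b] := by
      unfold pvPairOf at hp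
      split at hp <;> simp_all
    have hpairs : pvPairs (l ++ [r]) = pvPairs l ++ [(a, b)] := by
      simp [pvPairs, List.filterMap_append, hp]
    have hfir : ∀ b', pvFirsts b' (l ++ [r])
        = if b = b' then pvFirsts b' l ++ [a] else pvFirsts b' l := by
      intro b'
      simp only [pvFirsts, hpairs, List.filter_append, List.map_append]
      by_cases hb : b = b'
      · subst hb; simp
      · simp [hb]
    rw [List.foldl_append, List.foldl_cons, List.foldl_nil]
    set F := l.foldl (pvStepB (PySem.Set.ofList id_list)) (pvInitDict id_list PySem.Set.empty) with hF
    have hcts : PySem.Set.contains (PySem.Set.ofList id_list) b = decide (b ∈ id_list) := by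
      rw [pv_contains_eq]
      simp [PySem.Set.mem_ofList]
    simp only [pvStepB, hsplit, hcts]
    by_cases hbid : b ∈ id_list
    · simp only [hbid, decide_true, if_true]
      refine ⟨fun b' => ?_, ?_⟩
      · rw [PySem.Dict.getD_modify]
        by_cases hbb : b' = b
        · subst hbb
          rw [if_pos rfl, ih1 b', if_pos hbid, if_pos hbid, hfir b', if_pos rfl,
              PySem.Set.ofList_append_singleton]
        · rw [if_neg hbb, ih1 b', hfir b', if_neg (fun h : b = b' => hbb h.symm)]
      · have hcb : F.contains b = true := by
          rw [PySem.Dict.contains_eq_decide_mem_keys, ih2]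
          simp [hbid]
        rw [PySem.Dict.keys_modify, PySem.Dict.keys_insert_of_contains _ _ hcb, ih2]
    · simp only [hbid, decide_false, Bool.false_eq_true, if_false]
      refine ⟨fun b' => ?_, ih2⟩
      rw [ih1 b']
      by_cases hb' : b' ∈ id_list
      · rw [if_pos hb', if_pos hb', hfir b', if_neg (fun h : b = b' => hbid (h ▸ hb'))]
      · rw [if_neg hb', if_neg hb']

-- B's mail loop, as a sum over the value list
theorem pv_mail_getD (k : Int) (vs : List (PySem.Set String)) (m : PySem.Dict String Int) (u : String) :
    (vs.foldl (pvMailStep k) m).getD u 0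
      = m.getD u 0 + (vs.map (fun reps =>
          if k ≤ (PySem.Set.len reps : Int) then (reps.count u : Int) else 0)).sum := by
  induction vs generalizing m with
  | nil => simp
  | cons reps vs ih =>
    simp only [List.foldl_cons, List.map_cons, List.sum_cons, ih]
    unfold pvMailStep
    split
    · rw [PySem.Dict.getD_foldl_modify_add_one]
      ring
    · ring

-- distinct reporters of b = distinct pairs with target b
theorem pv_len_ofList_firsts (q : List (String × String)) (b : String) :
    (PySem.Set.ofList ((q.filter (fun p => p.2 == b)).map (fun p => p.1))).length
      = (PySem.Set.ofList q).countP (fun p => p.2 == b) := by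
  induction q using List.reverseRecOn with
  | nil => simp
  | append_singleton q p ih =>
    obtain ⟨a1, b1⟩ := p
    rw [List.filter_append, PySem.Set.ofList_append_singleton]
    by_cases hb : b1 = b
    · subst hb
      have hf : [(a1, b1)].filter (fun p => p.2 == b1) = [(a1, b1)] := by simp
      rw [hf, List.map_append]
      simp only [List.map_cons, List.map_nil]
      rw [PySem.Set.ofList_append_singleton]
      by_cases hp : (a1, b1) ∈ PySem.Set.ofList q
      · have hp1 : a1 ∈ PySem.Set.ofList ((q.filter (fun p => p.2 == b1)).map (fun p => p.1)) := by
          rw [PySem.Set.mem_ofList, pv_mem_firstsL]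
          exact (PySem.Set.mem_ofList q _).mp hp
        rw [PySem.Set.add_of_mem hp, PySem.Set.add_of_mem hp1, ih]
      · have hp1 : a1 ∉ PySem.Set.ofList ((q.filter (fun p => p.2 == b1)).map (fun p => p.1)) := by
          rw [PySem.Set.mem_ofList, pv_mem_firstsL]
          intro h
          exact hp ((PySem.Set.mem_ofList q _).mpr h)
        rw [PySem.Set.add_of_not_mem hp, PySem.Set.add_of_not_mem hp1,
            List.countP_append, List.length_append, ih]
        simp
    · have hf : [(a1, b1)].filter (fun p => p.2 == b) = [] := by simp [hb]
      rw [hf, List.append_nil]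
      by_cases hp : (a1, b1) ∈ PySem.Set.ofList q
      · rw [PySem.Set.add_of_mem hp, ih]
      · rw [PySem.Set.add_of_not_mem hp, List.countP_append, ih]
        simp [hb]

-- symmetric count of common elements of two duplicate-free lists
theorem pv_countP_mem_comm {α : Type} [DecidableEq α] (l₁ l₂ : List α)
    (h₁ : l₁.Nodup) (h₂ : l₂.Nodup) :
    l₁.countP (fun x => decide (x ∈ l₂)) = l₂.countP (fun x => decide (x ∈ l₁)) := by
  rw [List.countP_eq_length_filter, List.countP_eq_length_filter]
  refine List.Perm.length_eq ?_
  rw [List.perm_ext_iff_of_nodup (h₁.filter _) (h₂.filter _)]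
  intro a
  simp only [List.mem_filter, decide_eq_true_eq]
  tauto

-- the per-user equality of the two final counts
theorem pv_final (id_list L : List String) (k : Int) (u : String) :
    (((PySem.Set.ofList (pvSeconds u L)).countP (fun t =>
        PySem.Set.contains ((PySem.Set.ofList id_list).filter (fun b => decide (k ≤ (pvCnt L b : Int)))) t) : Nat) : Int)
      = (((PySem.Set.ofList id_list).map (fun b =>
          if k ≤ ((PySem.Set.ofList (pvFirsts b L)).length : Int)
          then ((PySem.Set.ofList (pvFirsts b L)).count u : Int) else 0)).sum) := by
  have hcnt : ∀ b : String, (PySem.Set.ofList (pvFirsts b L)).length = pvCnt L b := by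
    intro b
    unfold pvFirsts pvCnt
    exact pv_len_ofList_firsts (pvPairs L) b
  have hmemRS : ∀ b : String,
      (b ∈ PySem.Set.ofList (pvSeconds u L)) ↔ (u ∈ PySem.Set.ofList (pvFirsts b L)) := by
    intro b
    rw [PySem.Set.mem_ofList, PySem.Set.mem_ofList, pv_mem_seconds, pv_mem_firsts]
  set c : String → Bool :=
    fun b => decide (b ∈ PySem.Set.ofList (pvSeconds u L)) && decide (k ≤ (pvCnt L b : Int)) with hc
  -- right-hand side: a 0/1-sum is a countP
  have hterm : ∀ b ∈ PySem.Set.ofList id_list,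
      (if k ≤ ((PySem.Set.ofList (pvFirsts b L)).length : Int)
       then ((PySem.Set.ofList (pvFirsts b L)).count u : Int) else 0)
        = if c b = true then 1 else 0 := by
    intro b _
    rw [hc]
    by_cases hk : k ≤ ((pvCnt L b : Nat) : Int)
    · by_cases hm : u ∈ PySem.Set.ofList (pvFirsts b L)
      · rw [List.count_eq_one_of_mem (PySem.Set.nodup_ofList _) hm]
        simp [hcnt b, hk, (hmemRS b).mpr hm]
      · rw [List.count_eq_zero_of_not_mem hm]
        have hbs : ¬ b ∈ PySem.Set.ofList (pvSeconds u L) := fun h => hm ((hmemRS b).mp h)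
        simp [hcnt b, hbs]
    · simp [hcnt b, hk]
  rw [List.map_congr_left hterm, PySem.List.sum_map_ite_one_zero c (PySem.Set.ofList id_list)]
  -- left-hand side
  rw [List.countP_congr (fun t _ => by rw [pv_contains_eq]),
      pv_countP_mem_comm _ _ (PySem.Set.nodup_ofList _) ((PySem.Set.nodup_ofList _).filter _),
      List.countP_filter]

-- ===== VERDICT (by name: the statement is the Claim_ definition above) =====
theorem solution_spec : Claim_equal_solution := by
  intro id_list report k _ hpre
  unfold Spec_solution solution solution_alt
  set L := PySem.Set.ofList report with hL
  have hpreL : ∀ r ∈ L, pvRecOk id_list r = true :=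
    fun r h => hpre r ((PySem.Set.mem_ofList report r).mp h)
  obtain ⟨hA1, hA2, hA3⟩ := pv_A_inv id_list L hpreL
  obtain ⟨hB1, hB2⟩ := pv_B_inv id_list L hpreL
  set st := L.foldl pvStepA (pvInitDict id_list PySem.Set.empty, pvInitDict id_list (0 : Int)) with hst
  set rof := L.foldl (pvStepB (PySem.Set.ofList id_list)) (pvInitDict id_list PySem.Set.empty) with hrof
  have hkeysnd : st.2.keys.Nodup := by rw [hA3]; exact PySem.Set.nodup_ofList _
  have hrofnd : rof.keys.Nodup := by rw [hB2]; exact PySem.Set.nodup_ofList _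
  -- A's items list
  have hitems : st.2.items = (PySem.Set.ofList id_list).map (fun b => (b, (pvCnt L b : Int))) := by
    rw [PySem.Dict.items_eq_map_keys st.2 hkeysnd 0, hA3]
    refine List.map_congr_left fun b hb => ?_
    rw [hA2 b, if_pos ((PySem.Set.mem_ofList _ _).mp hb)]
  -- A's suspended set
  have hsusp : PySem.Set.ofList ((st.2.items.filter (fun p => k ≤ p.2)).map (fun p => p.1))
      = (PySem.Set.ofList id_list).filter (fun b => decide (k ≤ (pvCnt L b : Int))) := by
    rw [hitems, List.filter_map, List.map_map]
    have h1 : ((fun p : String × Int => p.1) ∘ fun b => (b, (pvCnt L b : Int))) = id := rfl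
    have h2 : ((fun p : String × Int => decide (k ≤ p.2)) ∘ fun b => (b, (pvCnt L b : Int)))
        = fun b => decide (k ≤ (pvCnt L b : Int)) := rfl
    rw [h1, h2, List.map_id,
        PySem.Set.ofList_eq_self_of_nodup _ ((PySem.Set.nodup_ofList _).filter _)]
  -- B's value list
  have hvals : rof.values = (PySem.Set.ofList id_list).map (fun b => PySem.Set.ofList (pvFirsts b L)) := by
    rw [PySem.Dict.values_eq_map_keys rof hrofnd PySem.Set.empty, hB2]
    refine List.map_congr_left fun b hb => ?_
    rw [hB1 b, if_pos ((PySem.Set.mem_ofList _ _).mp hb)]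
  refine List.map_congr_left fun u hu => ?_
  -- the A-side entry
  have hAget : st.1.getD u PySem.Set.empty = PySem.Set.ofList (pvSeconds u L) := by
    rw [PySem.Dict.getD_eq_get?_getD, hA1 u, if_pos hu]
    rfl
  rw [hAget, hsusp]
  -- the B-side entry
  rw [pv_mail_getD, hvals, List.map_map]
  have hm0 : (pvInitDict id_list (0 : Int)).getD u 0 = 0 := by
    rw [PySem.Dict.getD_eq_get?_getD, pv_init_get?]
    by_cases hu0 : u ∈ id_list <;> simp [hu0]
  rw [hm0, zero_add]
  have hcomp : ((fun reps : PySem.Set String =>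
        if k ≤ (PySem.Set.len reps : Int) then ((reps.count u : Nat) : Int) else 0)
        ∘ fun b => PySem.Set.ofList (pvFirsts b L))
      = fun b => if k ≤ ((PySem.Set.ofList (pvFirsts b L)).length : Int)
          then (((PySem.Set.ofList (pvFirsts b L)).count u : Nat) : Int) else 0 := by
    funext b
    simp [PySem.Set.len]
  rw [hcomp]
  exact pv_final id_list L k u
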